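-- pv_equiv track=rewrite | github.com/Whitening-Sinabro/Pathcraft-AI | python/damage_type_extractor.py | classify_damage_axes_from_gems
-- ===== SOURCE A (Python) =====
-- DAMAGE_AXES: tuple[str, ...] = ("attack", "caster", "dot", "minion")
--
-- def classify_damage_axes_from_gems(
--     gem_names: list[str],
--     gem_damage_types: dict[str, dict[str, bool]],
-- ) -> frozenset[str]:
--     """Gem 이름 리스트 → damage axis frozenset.
--
--     Support gem 필터링 없음 — gem_damage_types.json 생성 시 이미 support는
--     대부분 damage axis flag 없어서 누락됨 (auras/buffs only). 결과적으로 조용히 걸러짐.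
--
--     Args:
--         gem_names: build의 모든 스킬 젬 (active + supports 혼재 가능)
--         gem_damage_types: load_gem_damage_types() 결과
--
--     Returns:
--         {"attack", "caster", "dot", "minion"}의 서브셋. lookup miss 시 빈 frozenset.
--     """
--     if not gem_names or not gem_damage_types:
--         return frozenset()
--     result: set[str] = set()
--     for gem in gem_names:
--         axes = gem_damage_types.get(gem)
--         if not axes:
--             continue
--         for axis in DAMAGE_AXES:
--             if axes.get(axis):
--                 result.add(axis)
--     return frozenset(result)
-- ===== SOURCE B (Python) =====
-- DAMAGE_AXES: tuple[str, ...] = ("attack", "caster", "dot", "minion")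
--
--
-- def classify_damage_axes_from_gems(
--     gem_names: list[str],
--     gem_damage_types: dict[str, dict[str, bool]],
-- ) -> frozenset[str]:
--     """Axis-outer scan: an axis belongs to the result iff some gem flags it."""
--     return frozenset(
--         axis
--         for axis in DAMAGE_AXES
--         if any((gem_damage_types.get(g) or {}).get(axis) for g in gem_names)
--     )
-- ===== Notes on version B (the rewrite author's own statement) =====
-- stated objective: alternative
-- what changed: Transposes the loops: instead of one accumulating pass over gems maintaining a mutable set (with an early-return guard), B tests each of the four fixed axes against all gems with a short-circuiting any() and builds the frozenset directly; no set accumulator and no guard clause.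
import Mathlib
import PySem

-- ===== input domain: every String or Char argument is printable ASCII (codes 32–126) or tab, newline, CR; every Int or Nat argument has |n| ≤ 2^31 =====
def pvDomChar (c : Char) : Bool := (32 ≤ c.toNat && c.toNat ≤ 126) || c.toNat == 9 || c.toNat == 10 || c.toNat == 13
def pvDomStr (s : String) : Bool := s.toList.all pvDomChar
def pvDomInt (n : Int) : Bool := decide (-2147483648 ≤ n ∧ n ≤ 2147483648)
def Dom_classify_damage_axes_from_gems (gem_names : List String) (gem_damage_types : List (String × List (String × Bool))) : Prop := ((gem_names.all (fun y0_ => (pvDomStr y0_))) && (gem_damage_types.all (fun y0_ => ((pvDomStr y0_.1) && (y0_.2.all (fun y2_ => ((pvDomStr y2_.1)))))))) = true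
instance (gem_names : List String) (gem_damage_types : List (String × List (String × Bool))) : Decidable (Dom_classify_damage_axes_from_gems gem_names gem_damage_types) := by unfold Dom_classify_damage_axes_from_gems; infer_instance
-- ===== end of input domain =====

-- B transposes A's gem-outer accumulating pass into an axis-outer any-scan; an alternative decomposition of equal cost.
-- Both Pythons return a frozenset (order-free); both ports represent it canonically as the sorted list of its elements.

-- ===== PORT A =====
def pvDAMAGE_AXES : List String := ["attack", "caster", "dot", "minion"]

def classify_damage_axes_from_gems (gem_names : List String) (gem_damage_types : List (String × List (String × Bool))) : List String :=
  -- `if not gem_names or not gem_damage_types: return frozenset()`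
  if gem_names.isEmpty || gem_damage_types.isEmpty then []
  else
    let result := gem_names.foldl (fun result gem =>
      match (PySem.Dict.mk gem_damage_types).get? gem with
      | none => result          -- `if not axes: continue` (lookup miss)
      | some axes =>
        if axes.isEmpty then result   -- `if not axes: continue` (empty dict)
        else pvDAMAGE_AXES.foldl (fun r axis =>
          if (PySem.Dict.mk axes).getD axis false then PySem.Set.add r axis else r) result) []
    -- `frozenset(result)`: a frozenset is order-free; represented canonically as the sorted element list
    PySem.List.sorted result (fun x => x) false

-- ===== PORT B =====
def classify_damage_axes_from_gems_alt (gem_names : List String) (gem_damage_types : List (String × List (String × Bool))) : List String :=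
  -- `frozenset(axis for axis in DAMAGE_AXES if any(...))`: the generator yields distinct elements
  -- already in sorted order, so the canonical (sorted) representation of the frozenset is the filter itself
  pvDAMAGE_AXES.filter (fun axis =>
    gem_names.any (fun g =>
      (PySem.Dict.mk (((PySem.Dict.mk gem_damage_types).get? g).getD [])).getD axis false))

-- ===== PRECONDITION & SPEC =====
def Spec_classify_damage_axes_from_gems (gem_names : List String) (gem_damage_types : List (String × List (String × Bool))) (out : List String) : Prop := out = classify_damage_axes_from_gems_alt gem_names gem_damage_types
instance (gem_names : List String) (gem_damage_types : List (String × List (String × Bool))) (out : List String) : Decidable (Spec_classify_damage_axes_from_gems gem_names gem_damage_types out) := by unfold Spec_classify_damage_axes_from_gems; infer_instance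

-- ===== CLAIM (what is proved, stated in full; the proofs are below) =====
def Claim_equal_classify_damage_axes_from_gems : Prop := ∀ (gem_names : List String) (gem_damage_types : List (String × List (String × Bool))), Dom_classify_damage_axes_from_gems gem_names gem_damage_types → Spec_classify_damage_axes_from_gems gem_names gem_damage_types (classify_damage_axes_from_gems gem_names gem_damage_types)

-- ===== LEMMAS AND PROOFS =====

-- DAMAGE_AXES is strictly increasing (String '<' via the toList bridge)
theorem pvAxes_pairwise_lt : pvDAMAGE_AXES.Pairwise (· < ·) := by
  have h : (pvDAMAGE_AXES.map String.toList).Pairwise (· < ·) := by decide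
  exact (List.pairwise_map.mp h).imp (fun hab => String.lt_iff_toList_lt.mpr hab)

-- whether gem `g` flags axis `ax` (the predicate B tests, phrased on the raw input)
def pvQ (gdt : List (String × List (String × Bool))) (g ax : String) : Bool :=
  (PySem.Dict.mk (((PySem.Dict.mk gdt).get? g).getD [])).getD ax false

-- A's inner fold: membership
theorem mem_inner (c : String → Bool) (l : List String) (s : List String) (x : String) :
    x ∈ l.foldl (fun r ax => if c ax then PySem.Set.add r ax else r) s
      ↔ x ∈ s ∨ (x ∈ l ∧ c x = true) := by
  induction l generalizing s with
  | nil => simp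
  | cons a l ih =>
    simp only [List.foldl_cons]
    by_cases h : c a = true
    · rw [if_pos h, ih]
      simp only [PySem.Set.mem_add, List.mem_cons]
      constructor
      · rintro (⟨hx | rfl⟩ | ⟨hl, hc⟩)
        · exact Or.inl hx
        · exact Or.inr ⟨Or.inl rfl, h⟩
        · exact Or.inr ⟨Or.inr hl, hc⟩
      · rintro (hx | ⟨(rfl | hl), hc⟩)
        · exact Or.inl (Or.inl hx)
        · exact Or.inl (Or.inr rfl)
        · exact Or.inr ⟨hl, hc⟩
    · rw [if_neg h, ih]
      simp only [List.mem_cons]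
      constructor
      · rintro (hx | ⟨hl, hc⟩)
        · exact Or.inl hx
        · exact Or.inr ⟨Or.inr hl, hc⟩
      · rintro (hx | ⟨(rfl | hl), hc⟩)
        · exact Or.inl hx
        · exact absurd hc h
        · exact Or.inr ⟨hl, hc⟩

-- A's inner fold: Nodup is preserved
theorem nodup_inner (c : String → Bool) (l : List String) (s : List String) (hs : s.Nodup) :
    (l.foldl (fun r ax => if c ax then PySem.Set.add r ax else r) s).Nodup := by
  induction l generalizing s with
  | nil => exact hs
  | cons a l ih =>
    simp only [List.foldl_cons]
    by_cases h : c a = true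
    · rw [if_pos h]; exact ih _ (PySem.Set.nodup_add _ _ hs)
    · rw [if_neg h]; exact ih _ hs

-- A's one outer step, rewritten through pvQ (the lookup-miss and empty-dict skips coincide
-- with pvQ being false on every axis)
theorem step_eq (gdt : List (String × List (String × Bool))) (g : String) (s : List String) :
    (match (PySem.Dict.mk gdt).get? g with
     | none => s
     | some axes =>
       if axes.isEmpty then s
       else pvDAMAGE_AXES.foldl (fun r axis =>
         if (PySem.Dict.mk axes).getD axis false then PySem.Set.add r axis else r) s)
      = pvDAMAGE_AXES.foldl (fun r axis =>
          if pvQ gdt g axis then PySem.Set.add r axis else r) s := by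
  unfold pvQ
  cases hg : (PySem.Dict.mk gdt).get? g with
  | none =>
    simp only [Option.getD_none]
    have : ∀ ax, (PySem.Dict.mk ([] : List (String × Bool))).getD ax false = false := by
      intro ax; rfl
    simp [this]
  | some axes =>
    simp only [Option.getD_some]
    by_cases he : axes.isEmpty = true
    · rw [List.isEmpty_iff] at he
      subst he
      have : ∀ ax, (PySem.Dict.mk ([] : List (String × Bool))).getD ax false = false := by
        intro ax; rfl
      simp [this]
    · rw [if_neg he]
      rfl

-- A's outer fold: membership
theorem mem_outer (gdt : List (String × List (String × Bool))) (names : List String)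
    (s : List String) (x : String) :
    x ∈ names.foldl (fun result gem =>
      match (PySem.Dict.mk gdt).get? gem with
      | none => result
      | some axes =>
        if axes.isEmpty then result
        else pvDAMAGE_AXES.foldl (fun r axis =>
          if (PySem.Dict.mk axes).getD axis false then PySem.Set.add r axis else r) result) s
      ↔ x ∈ s ∨ (x ∈ pvDAMAGE_AXES ∧ ∃ g ∈ names, pvQ gdt g x = true) := by
  induction names generalizing s with
  | nil => simp
  | cons g t ih =>
    simp only [List.foldl_cons]
    rw [step_eq, ih, mem_inner]
    simp only [List.mem_cons]
    constructor
    · rintro ((hx | ⟨hax, hq⟩) | ⟨hax, g', hg', hq⟩)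
      · exact Or.inl hx
      · exact Or.inr ⟨hax, g, Or.inl rfl, hq⟩
      · exact Or.inr ⟨hax, g', Or.inr hg', hq⟩
    · rintro (hx | ⟨hax, g', (rfl | hg'), hq⟩)
      · exact Or.inl (Or.inl hx)
      · exact Or.inl (Or.inr ⟨hax, hq⟩)
      · exact Or.inr ⟨hax, g', hg', hq⟩

-- A's outer fold: Nodup
theorem nodup_outer (gdt : List (String × List (String × Bool))) (names : List String)
    (s : List String) (hs : s.Nodup) :
    (names.foldl (fun result gem =>
      match (PySem.Dict.mk gdt).get? gem with
      | none => result
      | some axes =>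
        if axes.isEmpty then result
        else pvDAMAGE_AXES.foldl (fun r axis =>
          if (PySem.Dict.mk axes).getD axis false then PySem.Set.add r axis else r) result) s).Nodup := by
  induction names generalizing s with
  | nil => exact hs
  | cons g t ih =>
    simp only [List.foldl_cons]
    rw [step_eq]
    exact ih _ (nodup_inner _ _ _ hs)

-- the sorted canonicalisation of A's accumulated set is exactly B's filter
theorem sorted_fold_eq_alt (names : List String) (gdt : List (String × List (String × Bool))) :
    PySem.List.sorted (names.foldl (fun result gem =>
      match (PySem.Dict.mk gdt).get? gem with
      | none => result
      | some axes =>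
        if axes.isEmpty then result
        else pvDAMAGE_AXES.foldl (fun r axis =>
          if (PySem.Dict.mk axes).getD axis false then PySem.Set.add r axis else r) result) [])
      (fun x => x) false
      = classify_damage_axes_from_gems_alt names gdt := by
  apply PySem.List.sorted_eq_of_perm_of_pairwise_lt
  · apply (List.perm_ext_iff_of_nodup ?_ ?_).mpr
    · intro x
      rw [mem_outer]
      unfold classify_damage_axes_from_gems_alt
      simp only [List.mem_filter, List.any_eq_true, List.not_mem_nil, false_or]
      unfold pvQ
      tauto
    · exact (by decide : pvDAMAGE_AXES.Nodup).filter _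
    · exact nodup_outer _ _ _ List.nodup_nil
  · exact pvAxes_pairwise_lt.filter _

theorem alt_of_empty_names (gdt : List (String × List (String × Bool))) :
    classify_damage_axes_from_gems_alt [] gdt = [] := by
  unfold classify_damage_axes_from_gems_alt
  simp

theorem alt_of_empty_gdt (names : List String) :
    classify_damage_axes_from_gems_alt names [] = [] := by
  unfold classify_damage_axes_from_gems_alt
  have h : ∀ ax, (names.any (fun g =>
      (PySem.Dict.mk (((PySem.Dict.mk ([] : List (String × List (String × Bool)))).get? g).getD [])).getD ax false)) = false := by
    intro ax
    simp only [List.any_eq_false]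
    intro g _
    exact fun h => Bool.noConfusion h
  simp [h]

-- ===== VERDICT (by name: the statement is the Claim_ definition above) =====
theorem classify_damage_axes_from_gems_spec : Claim_equal_classify_damage_axes_from_gems := by
  intro names gdt _
  unfold Spec_classify_damage_axes_from_gems classify_damage_axes_from_gems
  by_cases hn : names.isEmpty = true
  · rw [List.isEmpty_iff] at hn
    subst hn
    simp [alt_of_empty_names]
  · by_cases hd : gdt.isEmpty = true
    · rw [List.isEmpty_iff] at hd
      subst hd
      simp [hn, alt_of_empty_gdt]
    · simp only [hn, hd, Bool.or_false]
      exact sorted_fold_eq_alt names gdt
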